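-- pv_equiv track=rewrite | github.com/neurord/TD2Q | TD2Q_Qhx_graphs.py | replace_star
-- ===== SOURCE A (Python) =====
-- def replace_star(states):
--     new_states=[]
--     for state in states:
--         star_index=[i for i, letter in enumerate(state[1]) if letter =='*']
--         if len(star_index)==1:
--             for symb in ['L','R','-']:
--                 new_states.append((state[0],state[1].replace('*',symb)))
--         elif len(star_index)==2:
--             newst=[]
--             for symb in ['L','R','-']:
--                 newst.append(state[1].replace('*',symb,1))
--             for st in newst:
--                 for symb in ['L','R']:
--                     new_states.append((state[0],st.replace('*',symb)))
--     return new_states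
-- ===== SOURCE B (Python) =====
-- def replace_star(states):
--     def expand(chars, positions, first):
--         if not positions:
--             return [''.join(chars)]
--         i, rest = positions[0], positions[1:]
--         out = []
--         for symb in ('LR-' if first else 'LR'):
--             out.extend(expand(chars[:i] + [symb] + chars[i + 1:], rest, False))
--         return out
--
--     new_states = []
--     for label, s in states:
--         positions = [i for i, c in enumerate(s) if c == '*']
--         if len(positions) in (1, 2):
--             for t in expand(list(s), positions, True):
--                 new_states.append((label, t))
--     return new_states
-- ===== Notes on version B (the rewrite author's own statement) =====
-- stated objective: alternative
-- what changed: Replaces A's separate 1-star/2-star branches built on str.replace with one uniform recursion over the star positions that substitutes index-by-index, the per-position alphabet ('LR-' for the first star, 'LR' for later ones) driving the enumeration.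
import Mathlib
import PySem

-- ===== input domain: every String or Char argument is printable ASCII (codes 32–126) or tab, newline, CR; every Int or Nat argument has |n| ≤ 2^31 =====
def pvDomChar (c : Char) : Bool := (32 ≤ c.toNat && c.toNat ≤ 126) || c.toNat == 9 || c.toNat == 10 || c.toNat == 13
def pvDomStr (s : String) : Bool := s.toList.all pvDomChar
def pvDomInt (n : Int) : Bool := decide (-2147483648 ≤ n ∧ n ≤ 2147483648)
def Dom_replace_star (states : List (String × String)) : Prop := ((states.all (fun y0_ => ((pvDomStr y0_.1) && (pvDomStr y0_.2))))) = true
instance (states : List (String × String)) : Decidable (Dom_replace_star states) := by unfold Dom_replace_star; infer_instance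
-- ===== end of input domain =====

-- B replaces A's separate 1-star/2-star branches built on str.replace with one uniform
-- recursion over the star positions substituting index-by-index (objective: alternative).

-- ===== PORT A =====
-- hand port of state[1].replace('*', symb, 1) for the single-char pattern '*':
-- replaces the first occurrence only (PySem has no count-limited replace); exact
def replaceFirst : List Char → Char → Char → List Char
  | [], _, _ => []
  | c :: t, old, new => if c = old then new :: t else c :: replaceFirst t old new

-- [i for i, letter in enumerate(s) if letter == '*'] — the identical comprehension
-- appears verbatim in A and in B, so both ports share this helper
def starIndex (l : List Char) : List Int :=
  ((PySem.List.enumerate l).filter (fun p => p.2 == '*')).map Prod.fst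

def replace_star (states : List (String × String)) : List (String × String) :=
  states.foldl
    (fun new_states state =>
      let si := starIndex state.2.toList
      if si.length = 1 then
        ['L', 'R', '-'].foldl
          (fun acc symb =>
            acc ++ [(state.1, String.ofList (PySem.Chars.replace state.2.toList ['*'] [symb]))])
          new_states
      else if si.length = 2 then
        let newst := ['L', 'R', '-'].foldl
          (fun acc symb => acc ++ [replaceFirst state.2.toList '*' symb]) []
        newst.foldl
          (fun acc st =>
            ['L', 'R'].foldl
              (fun acc2 symb =>
                acc2 ++ [(state.1, String.ofList (PySem.Chars.replace st ['*'] [symb]))])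
              acc)
          new_states
      else new_states)
    []

-- ===== PORT B =====
-- the positions come from enumerate, hence are nonnegative: .toNat is exact here
def altExpand (chars : List Char) (positions : List Int) (first : Bool) : List (List Char) :=
  match positions with
  | [] => [chars]
  | i :: rest =>
    (if first then ['L', 'R', '-'] else ['L', 'R']).flatMap
      (fun symb => altExpand (chars.set i.toNat symb) rest false)

def replace_star_alt (states : List (String × String)) : List (String × String) :=
  states.foldl
    (fun new_states state =>
      let pos := starIndex state.2.toList
      if pos.length = 1 ∨ pos.length = 2 then
        new_states ++ (altExpand state.2.toList pos true).map (fun t => (state.1, String.ofList t))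
      else new_states)
    []

-- ===== PRECONDITION & SPEC =====
def Spec_replace_star (states : List (String × String)) (out : List (String × String)) : Prop := out = replace_star_alt states
instance (states : List (String × String)) (out : List (String × String)) : Decidable (Spec_replace_star states out) := by unfold Spec_replace_star; infer_instance

-- ===== CLAIM (what is proved, stated in full; the proofs are below) =====
def Claim_equal_replace_star : Prop := ∀ (states : List (String × String)), Dom_replace_star states → Spec_replace_star states (replace_star states)

-- ===== LEMMAS AND PROOFS =====

def subst (c x : Char) : Char := if x = '*' then c else x

-- structural reading of the star-position list, for the proofs
def starsN : List Char → List Nat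
  | [] => []
  | c :: t => if c = '*' then 0 :: (starsN t).map (· + 1) else (starsN t).map (· + 1)

lemma starIndex_aux (l : List Char) : ∀ s : Int,
    ((PySem.List.enumerate l s).filter (fun p => p.2 == '*')).map Prod.fst
      = (starsN l).map (fun n => Int.ofNat n + s) := by
  induction l with
  | nil => intro s; simp [PySem.List.enumerate_nil, starsN]
  | cons x t ih =>
    intro s
    rw [PySem.List.enumerate_cons]
    by_cases hx : x = '*'
    · have hs : starsN (x :: t) = 0 :: (starsN t).map (· + 1) := by simp [starsN, hx]
      have hc : (x == '*') = true := by simpa using hx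
      rw [hs, List.filter_cons]
      simp only [hc]
      rw [if_pos trivial, List.map_cons, ih (s + 1)]
      refine List.cons_eq_cons.mpr ⟨by simp, ?_⟩
      rw [List.map_map]
      refine List.map_congr_left ?_
      intro n _
      simp only [Function.comp_apply, Int.ofNat_eq_natCast]
      push_cast; ring
    · have hs : starsN (x :: t) = (starsN t).map (· + 1) := by simp [starsN, hx]
      have hc : (x == '*') = false := by simpa using hx
      rw [hs, List.filter_cons]
      simp only [hc, Bool.false_eq_true, if_false, List.map_map]
      rw [ih (s + 1)]
      refine List.map_congr_left ?_
      intro n _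
      simp only [Function.comp_apply, Int.ofNat_eq_natCast]
      push_cast; ring

lemma starIndex_eq (l : List Char) : starIndex l = (starsN l).map Int.ofNat := by
  have := starIndex_aux l 0
  simpa [starIndex] using this

lemma replace_go_single (c : Char) :
    ∀ (l : List Char) (fuel : Nat) (acc : List Char), l.length ≤ fuel →
      PySem.Chars.replace.go ['*'] [c] fuel l acc = acc.reverse ++ l.map (subst c) := by
  intro l
  induction l with
  | nil =>
    intro fuel acc _
    cases fuel <;> simp [PySem.Chars.replace.go]
  | cons x t ih =>
    intro fuel acc hle
    cases fuel with
    | zero => simp at hle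
    | succ f =>
      simp only [PySem.Chars.replace.go]
      by_cases hx : x = '*'
      · subst hx
        simp only [List.isPrefixOf, BEq.rfl, Bool.true_and, if_pos]
        rw [show List.drop ['*'].length ('*' :: t) = t from rfl]
        rw [ih f ([c].reverse ++ acc) (by simpa using hle)]
        simp [subst]
      · have hpre : (['*'].isPrefixOf (x :: t)) = false := by
          simp [List.isPrefixOf]; intro h; exact absurd h.symm hx
        simp only [hpre, Bool.false_eq_true, if_false]
        rw [ih f (x :: acc) (by simpa using hle)]
        simp [subst, hx]

lemma replace_single (l : List Char) (c : Char) :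
    PySem.Chars.replace l ['*'] [c] = l.map (subst c) := by
  simp [PySem.Chars.replace, replace_go_single c l l.length [] le_rfl]

lemma map_subst_of_no_star (c : Char) :
    ∀ l : List Char, starsN l = [] → l.map (subst c) = l := by
  intro l
  induction l with
  | nil => intro _; rfl
  | cons x t ih =>
    intro h
    by_cases hx : x = '*'
    · simp [starsN, hx] at h
    · simp only [starsN, if_neg hx, List.map_eq_nil_iff] at h
      simp [subst, hx, ih h]

lemma map_subst_eq_set (c : Char) :
    ∀ (l : List Char) (i : Nat), starsN l = [i] → l.map (subst c) = l.set i c := by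
  intro l
  induction l with
  | nil => intro i h; simp [starsN] at h
  | cons x t ih =>
    intro i h
    by_cases hx : x = '*'
    · simp only [starsN, if_pos hx] at h
      obtain ⟨h0, h1⟩ := List.cons_eq_cons.mp h
      have ht : starsN t = [] := by simpa using h1.symm
      subst hx
      simp [← h0, subst, map_subst_of_no_star c t ht]
    · simp only [starsN, if_neg hx] at h
      rcases ht : starsN t with _ | ⟨a, as⟩
      · rw [ht] at h; simp at h
      · rw [ht] at h
        simp only [List.map_cons, List.cons_eq_cons] at h
        obtain ⟨h0, h1⟩ := h
        have has : as = [] := by simpa using h1.symm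
        subst has
        rw [← h0]
        simp [subst, hx, ih a (by rw [ht])]

lemma replaceFirst_eq_set (c : Char) :
    ∀ (l : List Char) (i : Nat) (rest : List Nat),
      starsN l = i :: rest → replaceFirst l '*' c = l.set i c := by
  intro l
  induction l with
  | nil => intro i rest h; simp [starsN] at h
  | cons x t ih =>
    intro i rest h
    by_cases hx : x = '*'
    · simp only [starsN, if_pos hx] at h
      obtain ⟨h0, _⟩ := List.cons_eq_cons.mp h
      subst hx
      simp [replaceFirst, ← h0]
    · simp only [starsN, if_neg hx] at h
      rcases ht : starsN t with _ | ⟨a, as⟩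
      · rw [ht] at h; simp at h
      · rw [ht] at h
        simp only [List.map_cons, List.cons_eq_cons] at h
        obtain ⟨h0, _⟩ := h
        rw [← h0]
        simp [replaceFirst, hx, ih a as (by rw [ht])]

lemma starsN_set (c : Char) (hc : c ≠ '*') :
    ∀ (l : List Char) (i : Nat) (rest : List Nat),
      starsN l = i :: rest → starsN (l.set i c) = rest := by
  intro l
  induction l with
  | nil => intro i rest h; simp [starsN] at h
  | cons x t ih =>
    intro i rest h
    by_cases hx : x = '*'
    · simp only [starsN, if_pos hx] at h
      obtain ⟨h0, h1⟩ := List.cons_eq_cons.mp h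
      rw [← h0]
      simp [starsN, hc, ← h1]
    · simp only [starsN, if_neg hx] at h
      rcases ht : starsN t with _ | ⟨a, as⟩
      · rw [ht] at h; simp at h
      · rw [ht] at h
        simp only [List.map_cons, List.cons_eq_cons] at h
        obtain ⟨h0, h1⟩ := h
        rw [← h0]
        simp only [List.set_cons_succ, starsN, if_neg hx]
        rw [ih a as (by rw [ht]), ← h1]

-- per-state contribution of A's loop body (A's branches with the accumulator factored out)
def contribA (state : String × String) : List (String × String) :=
  let si := starIndex state.2.toList
  if si.length = 1 then
    ['L', 'R', '-'].map
      (fun symb => (state.1, String.ofList (PySem.Chars.replace state.2.toList ['*'] [symb])))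
  else if si.length = 2 then
    (['L', 'R', '-'].map (fun symb => replaceFirst state.2.toList '*' symb)).flatMap
      (fun st => ['L', 'R'].map
        (fun symb => (state.1, String.ofList (PySem.Chars.replace st ['*'] [symb]))))
  else []

def contribB (state : String × String) : List (String × String) :=
  let pos := starIndex state.2.toList
  if pos.length = 1 ∨ pos.length = 2 then
    (altExpand state.2.toList pos true).map (fun t => (state.1, String.ofList t))
  else []

lemma replace_star_eq_flatMap (states : List (String × String)) :
    replace_star states = states.flatMap contribA := by
  suffices h : ∀ acc, states.foldl
      (fun new_states state =>
        let si := starIndex state.2.toList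
        if si.length = 1 then
          ['L', 'R', '-'].foldl
            (fun acc symb =>
              acc ++ [(state.1, String.ofList (PySem.Chars.replace state.2.toList ['*'] [symb]))])
            new_states
        else if si.length = 2 then
          let newst := ['L', 'R', '-'].foldl
            (fun acc symb => acc ++ [replaceFirst state.2.toList '*' symb]) []
          newst.foldl
            (fun acc st =>
              ['L', 'R'].foldl
                (fun acc2 symb =>
                  acc2 ++ [(state.1, String.ofList (PySem.Chars.replace st ['*'] [symb]))])
                acc)
            new_states
        else new_states) acc = acc ++ states.flatMap contribA by
    simpa [replace_star] using h []
  induction states with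
  | nil => intro acc; simp
  | cons st sts ih =>
    intro acc
    rw [List.foldl_cons, List.flatMap_cons, ih, ← List.append_assoc]
    congr 1
    unfold contribA
    dsimp only
    split_ifs with h1 h2 <;> simp [List.foldl, List.append_assoc]
  
lemma replace_star_alt_eq_flatMap (states : List (String × String)) :
    replace_star_alt states = states.flatMap contribB := by
  suffices h : ∀ acc, states.foldl
      (fun new_states state =>
        let pos := starIndex state.2.toList
        if pos.length = 1 ∨ pos.length = 2 then
          new_states ++ (altExpand state.2.toList pos true).map (fun t => (state.1, String.ofList t))
        else new_states) acc = acc ++ states.flatMap contribB by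
    simpa [replace_star_alt] using h []
  induction states with
  | nil => intro acc; simp
  | cons st sts ih =>
    intro acc
    rw [List.foldl_cons, List.flatMap_cons, ih, ← List.append_assoc]
    congr 1
    unfold contribB
    dsimp only
    split_ifs with h1 <;> simp

lemma contribA_eq_contribB (state : String × String) : contribA state = contribB state := by
  obtain ⟨a, s⟩ := state
  unfold contribA contribB
  simp only [starIndex_eq, List.length_map]
  rcases h : starsN s.toList with _ | ⟨i, _ | ⟨j, rest⟩⟩
  · simp
  · -- exactly one star, at position i
    norm_num
    simp [replace_single, map_subst_eq_set _ _ _ h, altExpand]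
  · rcases rest with _ | ⟨k, rest'⟩
    · -- exactly two stars, at positions i < j
      norm_num
      have hfirst : ∀ c : Char, replaceFirst s.toList '*' c = s.toList.set i c :=
        fun c => replaceFirst_eq_set c _ _ _ h
      have hsecond : ∀ c : Char, c ≠ '*' → starsN (s.toList.set i c) = [j] :=
        fun c hc => starsN_set c hc _ _ _ h
      simp [hfirst, replace_single,
        map_subst_eq_set _ _ _ (hsecond 'L' (by decide)),
        map_subst_eq_set _ _ _ (hsecond 'R' (by decide)),
        map_subst_eq_set _ _ _ (hsecond '-' (by decide)), altExpand]
    · -- three or more stars: both sides contribute nothing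
      simp

-- ===== VERDICT (by name: the statement is the Claim_ definition above) =====
theorem replace_star_spec : Claim_equal_replace_star := by
  intro states _
  unfold Spec_replace_star
  rw [replace_star_eq_flatMap, replace_star_alt_eq_flatMap]
  exact (List.flatMap_congr (fun st _ => (contribA_eq_contribB st).symm)).symm
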